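-- pv_equiv track=rewrite | github.com/HuaZao/ZFJObsLibSource | confusionFun.py | getBestFunMap
-- ===== SOURCE A (Python) =====
-- def getBestFunMap(line, method_list):
--     match_fun_list = []
--     for funNameMap in method_list:
--         funName = list(funNameMap.keys())[0]
--         isMatch = True
--         if len(funName.split(':')) >= 2:
--             for method_name in funName.split(':'):
--                 if method_name not in line:
--                     isMatch = False
--                 if len(method_name) == 0:
--                     isMatch = method_name + ':' not in line and False
--
--         else:
--             if funName not in line:
--                 isMatch = False
--         if isMatch == True:
--             match_fun_list.append(funNameMap)
--
--     funName_len = 0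
--     best_funNameMap = None
--     for funNameMap_item in match_fun_list:
--         funName = list(funNameMap_item.keys())[0]
--         if len(funName) > funName_len:
--             best_funNameMap = funNameMap_item
--             funName_len = len(funName)
--
--     if best_funNameMap == None:
--         return
--     else:
--         return best_funNameMap
-- ===== SOURCE B (Python) =====
-- def getBestFunMap(line, method_list):
--     # Sort-then-first-match: stable-sort entries by descending name length, then
--     # return the first entry whose name matches the line (longest match wins,
--     # ties resolved to the earliest original entry by sort stability).
--     def matches(name):
--         parts = name.split(':')
--         if len(parts) >= 2:
--             return all(p != '' and p in line for p in parts)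
--         return name in line
--     for funNameMap in sorted(method_list, key=lambda m: -len(next(iter(m)))):
--         if matches(next(iter(funNameMap))):
--             return funNameMap
--     return None
-- ===== Notes on version B (the rewrite author's own statement) =====
-- stated objective: alternative
-- what changed: B replaces A's filter-then-running-max selection by a different algorithm: stable-sort the entries by descending name length and return the first entry whose name matches the line (stability gives A's earliest-longest tie-breaking).
-- outside the precondition, e.g. on getBestFunMap('ab', [{'': 'v'}]): A returns None, B returns {'': 'v'}; on getBestFunMap('ab', [{}]): A raises IndexError, B raises StopIteration
import Mathlib
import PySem

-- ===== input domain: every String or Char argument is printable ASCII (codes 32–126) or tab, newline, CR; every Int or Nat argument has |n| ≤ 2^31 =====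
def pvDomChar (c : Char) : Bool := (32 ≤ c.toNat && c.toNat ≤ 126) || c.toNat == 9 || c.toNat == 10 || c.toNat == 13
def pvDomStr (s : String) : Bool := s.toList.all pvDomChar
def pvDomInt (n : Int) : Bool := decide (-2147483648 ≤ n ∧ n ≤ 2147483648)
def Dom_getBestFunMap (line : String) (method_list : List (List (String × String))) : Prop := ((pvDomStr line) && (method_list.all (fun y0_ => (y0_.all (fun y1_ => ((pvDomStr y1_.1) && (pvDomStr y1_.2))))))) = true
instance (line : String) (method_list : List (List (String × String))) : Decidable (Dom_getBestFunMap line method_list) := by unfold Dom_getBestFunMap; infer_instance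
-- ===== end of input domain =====

-- B replaces A's filter-then-running-max passes by a different algorithm: stable-sort the
-- entries by descending name length and return the first entry whose name matches the line.

-- ===== PORT A =====
def getBestFunMap (line : String) (method_list : List (List (String × String))) : Option (List (String × String)) :=
  let match_fun_list := method_list.foldl (fun acc funNameMap =>
    -- funName = list(funNameMap.keys())[0]; IndexError (empty dict) excluded by Pre_
    let funName := (PySem.List.pyGet? (PySem.Dict.keys ⟨funNameMap⟩) 0).getD ""
    let isMatch :=
      if ((PySem.Str.split? funName ":").getD []).length ≥ 2 then
        ((PySem.Str.split? funName ":").getD []).foldl (fun b method_name =>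
          let b := if PySem.Str.isIn method_name line = false then false else b
          if PySem.Str.len method_name = 0 then false else b) true
      else
        if PySem.Str.isIn funName line = false then false else true
    if isMatch then acc ++ [funNameMap] else acc) []
  let st := match_fun_list.foldl
    (fun (st : Int × Option (List (String × String))) funNameMap_item =>
      let funName := (PySem.List.pyGet? (PySem.Dict.keys ⟨funNameMap_item⟩) 0).getD ""
      if PySem.Str.len funName > st.1 then (PySem.Str.len funName, some funNameMap_item) else st)
    (0, none)
  st.2

-- ===== PORT B =====
-- matches(name) from Source B
def pvMatchesB (line name : String) : Bool :=
  let parts := (PySem.Str.split? name ":").getD []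
  if parts.length ≥ 2 then
    parts.all (fun p => decide (p ≠ "") && PySem.Str.isIn p line)
  else
    PySem.Str.isIn name line

def getBestFunMap_alt (line : String) (method_list : List (List (String × String))) : Option (List (String × String)) :=
  -- sorted(method_list, key=lambda m: -len(next(iter(m)))) then first match (the for/return loop)
  (PySem.List.sorted method_list
      (fun m => -(PySem.Str.len ((PySem.List.pyGet? (m.map Prod.fst) 0).getD ""))) false).find?
    (fun m => pvMatchesB line ((PySem.List.pyGet? (m.map Prod.fst) 0).getD ""))

-- ===== PRECONDITION & SPEC =====
-- Pre_ excludes entries that are an empty dict (A raises IndexError, B StopIteration) and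
-- entries whose first key is the empty string: an empty pattern trivially "matches" every line,
-- a corner nobody would specify — A never selects it (its length never beats the 0 threshold)
-- while B, scanning by descending length, returns it when nothing longer matches.
def Pre_getBestFunMap (line : String) (method_list : List (List (String × String))) : Prop :=
  ∀ m ∈ method_list, m ≠ [] ∧ m.headI.1 ≠ ""
instance (line : String) (method_list : List (List (String × String))) : Decidable (Pre_getBestFunMap line method_list) := by unfold Pre_getBestFunMap; infer_instance
def pvWitness_getBestFunMap : String × (List (List (String × String))) := ("ab:cd", [[("ab", "x")], [("ab:cd", "y")]])

def Spec_getBestFunMap (line : String) (method_list : List (List (String × String))) (out : Option (List (String × String))) : Prop := out = getBestFunMap_alt line method_list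
instance (line : String) (method_list : List (List (String × String))) (out : Option (List (String × String))) : Decidable (Spec_getBestFunMap line method_list out) := by unfold Spec_getBestFunMap; infer_instance

-- ===== CLAIM (what is proved, stated in full; the proofs are below) =====
def Claim_equal_getBestFunMap : Prop := ∀ (line : String) (method_list : List (List (String × String))), Dom_getBestFunMap line method_list → Pre_getBestFunMap line method_list → Spec_getBestFunMap line method_list (getBestFunMap line method_list)

-- ===== LEMMAS AND PROOFS =====

-- proof-side abbreviations
def pvName (m : List (String × String)) : String := (PySem.List.pyGet? (m.map Prod.fst) 0).getD ""
def pvN (m : List (String × String)) : Int := PySem.Str.len (pvName m)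
def pvKey (m : List (String × String)) : Int := -(pvN m)
def pvP (line : String) (m : List (String × String)) : Bool := pvMatchesB line (pvName m)
def pvOptLen (o : Option (List (String × String))) : Int :=
  match o with
  | none => 0
  | some y => pvN y

theorem pvKeysName (m : List (String × String)) :
    (PySem.List.pyGet? (PySem.Dict.keys ⟨m⟩) 0).getD "" = pvName m := by
  simp [PySem.Dict.keys, pvName]

theorem pvLenZeroIff (p : String) : (PySem.Str.len p = 0) ↔ p = "" := by
  rw [PySem.Str.len_eq]
  rw [← String.toList_eq_nil_iff]
  constructor
  · intro h; exact List.length_eq_zero_iff.mp (by exact_mod_cast h)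
  · intro h; simp [h]

theorem pvPos (m : List (String × String)) (h1 : m ≠ []) (h2 : m.headI.1 ≠ "") : 0 < pvN m := by
  obtain ⟨⟨k, v⟩, t, rfl⟩ := List.exists_cons_of_ne_nil h1
  have hk : k ≠ "" := h2
  have hname : pvName ((k, v) :: t) = k := by
    simp [pvName, PySem.List.pyGet?, PySem.List.pyIdx?]
  have hne : ¬ (PySem.Str.len k = 0) := fun h => hk ((pvLenZeroIff k).mp h)
  have hge : 0 ≤ PySem.Str.len k := by rw [PySem.Str.len_eq]; positivity
  unfold pvN
  rw [hname]
  omega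

-- A's per-part flag loop equals B's all(...)
theorem pvFlagFold (line : String) (parts : List String) (b : Bool) :
    parts.foldl (fun b method_name =>
      let b := if PySem.Str.isIn method_name line = false then false else b
      if PySem.Str.len method_name = 0 then false else b) b
    = (b && parts.all (fun p => decide (p ≠ "") && PySem.Str.isIn p line)) := by
  induction parts generalizing b with
  | nil => simp
  | cons p ps ih =>
    rw [List.foldl_cons, ih, List.all_cons]
    by_cases hp : p = ""
    · subst hp; simp
    · have hlen : ¬ (PySem.Str.len p = 0) := fun h => hp ((pvLenZeroIff p).mp h)
      cases hin : PySem.Str.isIn p line <;> simp [hp, Bool.and_comm]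

-- A's isMatch computation equals B's matcher
theorem pvMatchEq (line name : String) :
    (if ((PySem.Str.split? name ":").getD []).length ≥ 2 then
        ((PySem.Str.split? name ":").getD []).foldl (fun b method_name =>
          let b := if PySem.Str.isIn method_name line = false then false else b
          if PySem.Str.len method_name = 0 then false else b) true
      else
        if PySem.Str.isIn name line = false then false else true)
    = pvMatchesB line name := by
  unfold pvMatchesB
  by_cases h : ((PySem.Str.split? name ":").getD []).length ≥ 2
  · simp only [h, if_pos, pvFlagFold, Bool.true_and]
  · simp only [h, if_false]
    cases hin : PySem.Str.isIn name line <;> simp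

-- A's filter-then-scan equals a fused running-best pass (intermediate form)
theorem pvFuse (line : String) (xs : List (List (String × String)))
    (l : Int) (b : Option (List (String × String))) :
    (List.foldl
      (fun (st : Int × Option (List (String × String))) item =>
        if PySem.Str.len (pvName item) > st.1 then (PySem.Str.len (pvName item), some item) else st)
      (l, b) (xs.filter (fun m => pvMatchesB line (pvName m)))).2
    = (List.foldl
      (fun (st : Option (List (String × String)) × Int) m =>
        if pvMatchesB line (pvName m) && decide (PySem.Str.len (pvName m) > st.2) then
          (some m, PySem.Str.len (pvName m))
        else st)
      (b, l) xs).1 := by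
  induction xs generalizing l b with
  | nil => simp
  | cons x xs ih =>
    rw [List.filter_cons]
    by_cases hm : pvMatchesB line (pvName x)
    · simp only [hm, if_pos, List.foldl_cons, Bool.true_and]
      by_cases hl : PySem.Str.len (pvName x) > l
      · simp only [hl, if_pos, decide_true, ih]
      · rw [if_neg hl, if_neg (by simpa using hl)]
        exact ih l b
    · simp only [hm, Bool.false_and, List.foldl_cons]
      exact ih l b

-- a match found in a key-ordered list is no longer than the head
theorem pvFindLe (line : String) (y : List (String × String)) (t : List (List (String × String)))
    (hs : ∀ z ∈ t, pvN z ≤ pvN y) :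
    pvOptLen (t.find? (pvP line)) ≤ pvN y ∨ t.find? (pvP line) = none := by
  cases hf : t.find? (pvP line) with
  | none => exact Or.inr rfl
  | some z => exact Or.inl (hs z (List.mem_of_find?_eq_some hf))

-- the key insertion step of the sort, characterised on the first match
theorem pvFindInsert (line : String) (x : List (String × String)) (s : List (List (String × String)))
    (hx : 0 < pvN x)
    (hs : List.Pairwise (fun a b => pvKey a ≤ pvKey b) s) :
    (PySem.List.insertBy (fun a b => decide (pvKey a < pvKey b)) x s).find? (pvP line)
      = if pvP line x && decide (pvOptLen (s.find? (pvP line)) < pvN x) then some x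
        else s.find? (pvP line) := by
  induction s with
  | nil =>
    by_cases hpx : pvP line x <;>
      simp [PySem.List.insertBy, List.find?, hpx, pvOptLen, hx]
  | cons y t ih =>
    have hyt : ∀ z ∈ t, pvN z ≤ pvN y := by
      intro z hz
      have := (List.pairwise_cons.mp hs).1 z hz
      unfold pvKey at this; omega
    have hst : List.Pairwise (fun a b => pvKey a ≤ pvKey b) t := (List.pairwise_cons.mp hs).2
    by_cases hb : pvKey x < pvKey y
    · -- n y < n x : x goes in front
      have hny : pvN y < pvN x := by unfold pvKey at hb; omega
      rw [show PySem.List.insertBy (fun a b => decide (pvKey a < pvKey b)) x (y :: t)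
            = x :: y :: t by simp [PySem.List.insertBy, hb]]
      by_cases hpx : pvP line x
      · rw [List.find?_cons_of_pos hpx]
        by_cases hpy : pvP line y
        · rw [List.find?_cons_of_pos hpy]
          have hcond : pvOptLen (some y) < pvN x := by simpa [pvOptLen] using hny
          simp [hpx, hcond]
        · have hft : List.find? (pvP line) (y :: t) = List.find? (pvP line) t :=
            List.find?_cons_of_neg (by simp [hpy])
          rw [hft]
          have hcond : pvOptLen (List.find? (pvP line) t) < pvN x := by
            rcases pvFindLe line y t hyt with h | h
            · omega
            · rw [h]; simpa [pvOptLen] using hx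
          simp [hpx, hcond]
      · rw [List.find?_cons_of_neg (by simp [hpx])]
        simp [hpx]
    · -- n x ≤ n y : x goes after y
      have hnx : pvN x ≤ pvN y := by unfold pvKey at hb; omega
      rw [show PySem.List.insertBy (fun a b => decide (pvKey a < pvKey b)) x (y :: t)
            = y :: PySem.List.insertBy (fun a b => decide (pvKey a < pvKey b)) x t by
          simp [PySem.List.insertBy, hb]]
      by_cases hpy : pvP line y
      · rw [List.find?_cons_of_pos hpy, List.find?_cons_of_pos hpy]
        have hno : ¬ (pvOptLen (some y) < pvN x) := by simp only [pvOptLen]; omega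
        simp [hno]
      · rw [List.find?_cons_of_neg (show ¬ pvP line y = true by simp [hpy]),
          List.find?_cons_of_neg (show ¬ pvP line y = true by simp [hpy])]
        exact ih hst

-- the fused running-best pass over xs computes the first match of the descending sort
theorem pvMain (line : String) (xs : List (List (String × String)))
    (h : ∀ m ∈ xs, 0 < pvN m) :
    (List.foldl
      (fun (st : Option (List (String × String)) × Int) m =>
        if pvP line m && decide (PySem.Str.len (pvName m) > st.2) then
          (some m, PySem.Str.len (pvName m))
        else st)
      (none, 0) xs)
    = ((PySem.List.sorted xs pvKey false).find? (pvP line),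
       pvOptLen ((PySem.List.sorted xs pvKey false).find? (pvP line))) := by
  induction xs using List.reverseRecOn with
  | nil => simp [PySem.List.sorted_eq_foldl_insertBy, pvOptLen]
  | append_singleton xs x ih =>
    have hx : 0 < pvN x := h x (by simp)
    have hxs : ∀ m ∈ xs, 0 < pvN m := fun m hm => h m (by simp [hm])
    have hsorted : PySem.List.sorted (xs ++ [x]) pvKey false
        = PySem.List.insertBy (fun a b => decide (pvKey a < pvKey b)) x
            (PySem.List.sorted xs pvKey false) := by
      rw [PySem.List.sorted_eq_foldl_insertBy, PySem.List.sorted_eq_foldl_insertBy,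
        List.foldl_append, List.foldl_cons, List.foldl_nil]
    rw [List.foldl_append, List.foldl_cons, List.foldl_nil, ih hxs, hsorted,
      pvFindInsert line x _ hx (PySem.List.sorted_pairwise xs pvKey)]
    have hcnd : (pvP line x
          && decide (PySem.Str.len (pvName x)
              > ((PySem.List.sorted xs pvKey false).find? (pvP line),
                  pvOptLen ((PySem.List.sorted xs pvKey false).find? (pvP line))).2))
        = (pvP line x
          && decide (pvOptLen ((PySem.List.sorted xs pvKey false).find? (pvP line)) < pvN x)) := by
      rfl
    rw [hcnd]
    by_cases hc : (pvP line x
        && decide (pvOptLen ((PySem.List.sorted xs pvKey false).find? (pvP line)) < pvN x)) = true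
    · rw [if_pos hc, if_pos hc]
      simp [pvOptLen, pvN]
    · rw [if_neg hc, if_neg hc]

theorem getBestFunMap_spec_aux (line : String) (method_list : List (List (String × String)))
    (hpre : Pre_getBestFunMap line method_list) :
    getBestFunMap line method_list = getBestFunMap_alt line method_list := by
  unfold getBestFunMap getBestFunMap_alt
  simp only [pvKeysName, pvMatchEq]
  rw [show (List.foldl (fun acc funNameMap =>
        if pvMatchesB line (pvName funNameMap) then acc ++ [funNameMap] else acc) [] method_list)
      = List.map id (List.filter (fun m => pvMatchesB line (pvName m)) method_list) from
    PySem.List.foldl_append_if _ id method_list []]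
  rw [List.map_id]
  rw [pvFuse line method_list 0 none]
  have h : ∀ m ∈ method_list, 0 < pvN m := fun m hm =>
    pvPos m (hpre m hm).1 (hpre m hm).2
  rw [show (fun (st : Option (List (String × String)) × Int) m =>
        if pvMatchesB line (pvName m) && decide (PySem.Str.len (pvName m) > st.2) then
          (some m, PySem.Str.len (pvName m))
        else st)
      = (fun (st : Option (List (String × String)) × Int) m =>
        if pvP line m && decide (PySem.Str.len (pvName m) > st.2) then
          (some m, PySem.Str.len (pvName m))
        else st) from rfl]
  rw [pvMain line method_list h]
  rfl

-- ===== VERDICT (by name: the statement is the Claim_ definition above) =====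
theorem getBestFunMap_spec : Claim_equal_getBestFunMap := by
  intro line method_list _ hpre
  unfold Spec_getBestFunMap
  exact getBestFunMap_spec_aux line method_list hpre
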